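-- pv_equiv track=rewrite | github.com/HCH725/HONGSTR | scripts/kb_sync_github_prs.py | _extract_why
-- ===== SOURCE A (Python) =====
-- def _extract_why(body: str | None) -> str:
--     """Extract the first 3 paragraphs from PR body as 'Why'."""
--     if not body:
--         return ""
--     paragraphs: list[str] = []
--     current: list[str] = []
--     for line in body.splitlines():
--         if line.strip():
--             current.append(line)
--         else:
--             if current:
--                 paragraphs.append("\n".join(current))
--                 current = []
--             if len(paragraphs) >= 3:
--                 break
--     if current:
--         paragraphs.append("\n".join(current))
--     return "\n\n".join(paragraphs[:3])
-- ===== SOURCE B (Python) =====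
-- def _extract_why(body):
--     """Extract the first 3 paragraphs from PR body as 'Why'."""
--     if not body:
--         return ""
--     lines = body.splitlines()
--     n = len(lines)
--     paragraphs = []
--     i = 0
--     while i < n:
--         if not lines[i].strip():
--             i += 1
--             continue
--         j = i
--         while j < n and lines[j].strip():
--             j += 1
--         paragraphs.append("\n".join(lines[i:j]))
--         i = j
--     return "\n\n".join(paragraphs[:3])
-- ===== Notes on version B (the rewrite author's own statement) =====
-- stated objective: alternative
-- what changed: Replaces A's accumulator/flush/early-break state machine with a two-pointer span scan: each maximal run of non-blank lines is located by an index pair and joined in one step, then the first three paragraphs are sliced off.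
import Mathlib
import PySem

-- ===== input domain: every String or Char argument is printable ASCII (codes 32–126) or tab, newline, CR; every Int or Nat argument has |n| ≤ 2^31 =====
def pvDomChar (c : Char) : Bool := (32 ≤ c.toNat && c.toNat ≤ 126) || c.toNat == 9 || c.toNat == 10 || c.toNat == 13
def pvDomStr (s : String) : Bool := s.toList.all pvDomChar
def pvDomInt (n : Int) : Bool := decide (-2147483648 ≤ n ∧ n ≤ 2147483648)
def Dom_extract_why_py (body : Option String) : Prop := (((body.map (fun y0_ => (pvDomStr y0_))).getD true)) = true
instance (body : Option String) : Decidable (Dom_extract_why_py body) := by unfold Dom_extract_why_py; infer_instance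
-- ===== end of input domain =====

-- B replaces A's accumulator/flush/early-break state machine with a two-pointer span scan
-- over line indices (objective: alternative structure, same O(n) cost).

-- shared tiny predicate: Python's truthiness of line.strip()
def pvNonblank (l : String) : Bool := !(PySem.Str.strip l == "")

-- ===== PORT A =====
-- the for-loop of A: state (paragraphs, current); returning early models 'break'
-- (at the break point current = [], so the trailing 'if current' flush is a no-op)
def pvLoopA : List String → List String → List String → List String
  | [], ps, cur => if cur.isEmpty then ps else ps ++ [PySem.Str.join "\n" cur]
  | l :: ls, ps, cur =>
    if pvNonblank l then pvLoopA ls ps (cur ++ [l])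
    else
      let ps' := if cur.isEmpty then ps else ps ++ [PySem.Str.join "\n" cur]
      if 3 ≤ ps'.length then ps'
      else pvLoopA ls ps' []

def extract_why_py (body : Option String) : String :=
  match body with
  | none => ""
  | some s =>
    if s == "" then ""
    else
      PySem.Str.join "\n\n"
        (PySem.List.slice (pvLoopA (PySem.Str.splitlines s) [] []) none (some 3))

-- ===== PORT B =====
-- lemmas the port's termination argument cites by name
theorem pvSpanEnd_aux (n j : Nat) (h : j < n) : n - (j + 1) < n - j := by omega

-- inner while: while j < n and lines[j].strip(): j += 1
def pvSpanEnd (lines : List String) (n : Nat) (j : Nat) : Nat :=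
  if h : j < n ∧ pvNonblank (lines.getD j "") then pvSpanEnd lines n (j + 1) else j
termination_by n - j
decreasing_by exact pvSpanEnd_aux n j h.1

theorem pvSpanEnd_le (lines : List String) (n j : Nat) : j ≤ pvSpanEnd lines n j := by
  induction hn : n - j using Nat.strong_induction_on generalizing j with
  | _ m ih =>
    rw [pvSpanEnd]
    split
    · rename_i h
      have := ih (n - (j+1)) (by omega) (j+1) rfl
      omega
    · exact Nat.le_refl j

theorem pvScanB_aux (lines : List String) (n i : Nat) (hi : i < n)
    (hnb : pvNonblank (lines.getD i "")) : n - pvSpanEnd lines n i < n - i := by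
  have h1 : i + 1 ≤ pvSpanEnd lines n (i + 1) := pvSpanEnd_le lines n (i + 1)
  rw [pvSpanEnd]
  simp only [hi, hnb, and_true, dif_pos]
  omega

-- outer while over index i, collecting paragraphs
def pvScanB (lines : List String) (n : Nat) (i : Nat) (paragraphs : List String) : List String :=
  if h : i < n then
    if pvNonblank (lines.getD i "") then
      let j := pvSpanEnd lines n i
      pvScanB lines n j
        (paragraphs ++ [PySem.Str.join "\n" (PySem.List.slice lines (some (i : Int)) (some (j : Int)))])
    else pvScanB lines n (i + 1) paragraphs
  else paragraphs
termination_by n - i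
decreasing_by
  · exact pvScanB_aux lines n i h (by assumption)
  · exact pvSpanEnd_aux n i h

def extract_why_py_alt (body : Option String) : String :=
  match body with
  | none => ""
  | some s =>
    if s == "" then ""
    else
      let lines := PySem.Str.splitlines s
      let paragraphs := pvScanB lines lines.length 0 []
      PySem.Str.join "\n\n" (PySem.List.slice paragraphs none (some 3))

-- ===== PRECONDITION & SPEC =====
def Spec_extract_why_py (body : Option String) (out : String) : Prop := out = extract_why_py_alt body
instance (body : Option String) (out : String) : Decidable (Spec_extract_why_py body out) := by unfold Spec_extract_why_py; infer_instance

-- ===== CLAIM (what is proved, stated in full; the proofs are below) =====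
def Claim_equal_extract_why_py : Prop := ∀ (body : Option String), Dom_extract_why_py body → Spec_extract_why_py body (extract_why_py body)

-- ===== LEMMAS AND PROOFS =====

-- proof helper: the maximal non-blank runs of a line list (neither port computes this)
def pvRuns : List String → List (List String)
  | [] => []
  | l :: ls =>
    if pvNonblank l then (l :: ls.takeWhile pvNonblank) :: pvRuns (ls.dropWhile pvNonblank)
    else pvRuns ls
termination_by ls => ls.length
decreasing_by
  · exact Nat.lt_succ_of_le (ls.length_dropWhile_le pvNonblank)
  · exact Nat.lt_succ_self _

theorem pvRuns_pos (l : String) (ls : List String) (h : pvNonblank l = true) :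
    pvRuns (l :: ls) = ((l :: ls).takeWhile pvNonblank) :: pvRuns ((l :: ls).dropWhile pvNonblank) := by
  rw [pvRuns]
  simp [h]

theorem pvTake_len_takeWhile {α : Type} (p : α → Bool) :
    ∀ xs : List α, xs.take ((xs.takeWhile p).length) = xs.takeWhile p := by
  intro xs
  induction xs with
  | nil => rfl
  | cons x xs ih =>
    by_cases h : p x <;> simp [h, ih]

theorem pvDrop_len_takeWhile {α : Type} (p : α → Bool) :
    ∀ xs : List α, xs.drop ((xs.takeWhile p).length) = xs.dropWhile p := by
  intro xs
  induction xs with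
  | nil => rfl
  | cons x xs ih =>
    by_cases h : p x <;> simp [h, ih]

-- A's loop state rephrased over lists
def pvRunsAux (cur : List String) : List String → List (List String)
  | [] => if cur.isEmpty then [] else [cur]
  | l :: ls =>
    if pvNonblank l then pvRunsAux (cur ++ [l]) ls
    else if cur.isEmpty then pvRunsAux [] ls else cur :: pvRunsAux [] ls

theorem pvRunsAux_eq (lines : List String) : ∀ cur : List String,
    pvRunsAux cur lines =
      if cur.isEmpty then pvRuns lines
      else (cur ++ lines.takeWhile pvNonblank) :: pvRuns (lines.dropWhile pvNonblank) := by
  induction lines with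
  | nil =>
    intro cur
    by_cases h : cur.isEmpty <;> simp [pvRunsAux, pvRuns, h]
  | cons l ls ih =>
    intro cur
    by_cases hl : pvNonblank l
    · rw [show pvRunsAux cur (l :: ls) = pvRunsAux (cur ++ [l]) ls by simp [pvRunsAux, hl]]
      rw [ih (cur ++ [l])]
      by_cases hc : cur.isEmpty
      · have hcn : cur = [] := List.isEmpty_iff.mp hc
        subst hcn
        simp [hc, pvRuns_pos l ls hl, hl]
      · simp [hc, hl]
    · rw [show pvRunsAux cur (l :: ls) =
            (if cur.isEmpty then pvRunsAux [] ls else cur :: pvRunsAux [] ls) by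
          simp [pvRunsAux, hl]]
      have h0 := ih []
      simp only [List.isEmpty_nil, if_pos] at h0
      have hR : pvRuns (l :: ls) = pvRuns ls := by rw [pvRuns]; simp [hl]
      by_cases hc : cur.isEmpty
      · simp [hc, h0, hR]
      · simp [hc, h0, hl, hR]

theorem pvLoopA_take (lines : List String) : ∀ ps cur : List String,
    (pvLoopA lines ps cur).take 3 =
      (ps ++ (pvRunsAux cur lines).map (PySem.Str.join "\n")).take 3 := by
  induction lines with
  | nil =>
    intro ps cur
    by_cases h : cur.isEmpty <;> simp [pvLoopA, pvRunsAux, h]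
  | cons l ls ih =>
    intro ps cur
    by_cases hl : pvNonblank l
    · simp only [pvLoopA, pvRunsAux, hl, if_pos]
      exact ih ps (cur ++ [l])
    · simp only [pvLoopA, pvRunsAux, hl, Bool.false_eq_true, ite_false]
      have hsplit :
          ps ++ List.map (PySem.Str.join "\n")
              (if cur.isEmpty then pvRunsAux [] ls else cur :: pvRunsAux [] ls) =
            (if cur.isEmpty then ps else ps ++ [PySem.Str.join "\n" cur]) ++
              List.map (PySem.Str.join "\n") (pvRunsAux [] ls) := by
        by_cases hc : cur.isEmpty <;> simp [hc]
      rw [hsplit]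
      set ps' := if cur.isEmpty then ps else ps ++ [PySem.Str.join "\n" cur] with hps'
      by_cases h3 : 3 ≤ ps'.length
      · simp only [h3, if_pos]
        rw [List.take_append_of_le_length h3]
      · simp only [h3, ite_false]
        exact ih ps' []

theorem pvSpanEnd_eq (lines : List String) : ∀ j : Nat,
    pvSpanEnd lines lines.length j = j + ((lines.drop j).takeWhile pvNonblank).length := by
  intro j
  induction hn : lines.length - j using Nat.strong_induction_on generalizing j with
  | _ m ih =>
    rw [pvSpanEnd]
    by_cases hj : j < lines.length
    · have hdrop := List.drop_eq_getElem_cons hj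
      have hgd : lines.getD j "" = lines[j] := List.getD_eq_getElem lines "" hj
      by_cases hb : pvNonblank lines[j]
      · rw [dif_pos ⟨hj, by rw [hgd]; exact hb⟩]
        rw [ih (lines.length - (j + 1)) (by omega) (j + 1) rfl]
        rw [hdrop, List.takeWhile_cons, if_pos hb]
        simp
        omega
      · rw [dif_neg (by rw [hgd]; tauto)]
        rw [hdrop, List.takeWhile_cons, if_neg hb]
        simp
    · rw [dif_neg (by tauto)]
      rw [List.drop_eq_nil_of_le (by omega)]
      simp

theorem pvScanB_eq (lines : List String) : ∀ i ps,
    pvScanB lines lines.length i ps =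
      ps ++ (pvRuns (lines.drop i)).map (PySem.Str.join "\n") := by
  intro i ps
  induction hn : lines.length - i using Nat.strong_induction_on generalizing i ps with
  | _ m ih =>
    rw [pvScanB]
    by_cases hi : i < lines.length
    · rw [dif_pos hi]
      have hdrop := List.drop_eq_getElem_cons hi
      have hgd : lines.getD i "" = lines[i] := List.getD_eq_getElem lines "" hi
      by_cases hb : pvNonblank lines[i]
      · rw [if_pos (by rw [hgd]; exact hb)]
        have hspan := pvSpanEnd_eq lines i
        set t := ((lines.drop i).takeWhile pvNonblank).length with ht
        have htpos : 1 ≤ t := by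
          rw [ht, hdrop, List.takeWhile_cons, if_pos hb]; simp
        have hslice :
            PySem.List.slice lines (some (i : Int)) (some ((pvSpanEnd lines lines.length i) : Int)) =
              (lines.drop i).takeWhile pvNonblank := by
          rw [hspan]
          rw [PySem.List.slice_toNat lines (by positivity) (by positivity)]
          simp only [Int.toNat_natCast]
          rw [show (i + t) - i = t from by omega]
          exact pvTake_len_takeWhile pvNonblank (lines.drop i)
        show pvScanB lines lines.length (pvSpanEnd lines lines.length i)
            (ps ++ [PySem.Str.join "\n"
              (PySem.List.slice lines (some (i : Int)) (some ((pvSpanEnd lines lines.length i) : Int)))]) =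
          ps ++ List.map (PySem.Str.join "\n") (pvRuns (List.drop i lines))
        rw [hslice]
        rw [ih (lines.length - pvSpanEnd lines lines.length i)
              (by rw [hspan]; omega) _ _ rfl]
        rw [hspan,
            show List.drop (i + t) lines = List.drop t (List.drop i lines) from by
              rw [List.drop_drop, Nat.add_comm],
            ht, pvDrop_len_takeWhile pvNonblank (lines.drop i)]
        have hcons : lines.drop i = lines[i] :: lines.drop (i + 1) := hdrop
        rw [show pvRuns (lines.drop i) =
              ((lines.drop i).takeWhile pvNonblank) ::
                pvRuns ((lines.drop i).dropWhile pvNonblank) from by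
            rw [hcons]; exact pvRuns_pos _ _ hb]
        simp
      · rw [if_neg (by rw [hgd]; exact hb)]
        rw [ih (lines.length - (i + 1)) (by omega) (i + 1) ps rfl]
        rw [hdrop]
        rw [show pvRuns (lines[i] :: lines.drop (i + 1)) = pvRuns (lines.drop (i + 1)) from by
          rw [pvRuns]; simp [hb]]
    · rw [dif_neg hi]
      rw [List.drop_eq_nil_of_le (by omega)]
      simp [pvRuns]

-- ===== VERDICT (by name: the statement is the Claim_ definition above) =====
theorem extract_why_py_spec : Claim_equal_extract_why_py := by
  intro body _
  unfold Spec_extract_why_py extract_why_py extract_why_py_alt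
  cases body with
  | none => rfl
  | some s =>
    by_cases hs : s == ""
    · simp [hs]
    · simp only [hs, Bool.false_eq_true, ite_false]
      have hA := pvLoopA_take (PySem.Str.splitlines s) [] []
      have hB := pvScanB_eq (PySem.Str.splitlines s) 0 []
      have hAux := pvRunsAux_eq (PySem.Str.splitlines s) []
      simp only [List.isEmpty_nil, if_pos] at hAux
      rw [hAux] at hA
      simp only [List.nil_append] at hA hB
      simp only [List.drop_zero] at hB
      rw [hB]
      rw [PySem.List.slice_to _ (by norm_num), PySem.List.slice_to _ (by norm_num)]
      simp only [show Int.toNat 3 = 3 from rfl]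
      exact congrArg (PySem.Str.join "\n\n") hA
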